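-- pv_equiv track=rewrite | github.com/mp65537/AIIR-PROJ-2021-Server | src/buildconf/rules.py | _sub_expr_to_pattern
-- ===== SOURCE A (Python) =====
-- def _sub_expr_to_pattern(input_string):
--     curr_offset = 0
--     result_string = ""
--     while True:
--         dollar_offset = input_string.find("$", curr_offset)
--         expr_offset = dollar_offset + 1
--         if (dollar_offset < 0) or (expr_offset >= len(input_string)):
--             break
--         if input_string[expr_offset] == "#":
--             result_string += input_string[curr_offset:dollar_offset]
--             result_string += "\\"
--             curr_offset = expr_offset + 1
--         else:
--             result_string += input_string[curr_offset:expr_offset]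
--             curr_offset = expr_offset
--             after_escaped_offset = curr_offset + 2
--             if (after_escaped_offset <= len(input_string)) and \
--                 (input_string[curr_offset:after_escaped_offset] == "$#"):
--                 result_string += "#"
--                 curr_offset = after_escaped_offset
--     result_string += input_string[curr_offset:]
--     return result_string
-- ===== SOURCE B (Python) =====
-- import re
--
-- def _sub_expr_to_pattern(input_string):
--     return re.sub(r'\$\$#|\$#',
--                   lambda m: '$#' if m.group(0) == '$$#' else '\\',
--                   input_string)
-- ===== Notes on version B (the rewrite author's own statement) =====
-- stated objective: idiomatic
-- what changed: The manual find/slice offset loop with hand-maintained curr_offset is replaced by a single re.sub over the alternation \$\$#|\$# with a function replacement ('$$#' -> '$#', '$#' -> a backslash); the regex engine's leftmost non-overlapping scan performs the whole traversal.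
import Mathlib
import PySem

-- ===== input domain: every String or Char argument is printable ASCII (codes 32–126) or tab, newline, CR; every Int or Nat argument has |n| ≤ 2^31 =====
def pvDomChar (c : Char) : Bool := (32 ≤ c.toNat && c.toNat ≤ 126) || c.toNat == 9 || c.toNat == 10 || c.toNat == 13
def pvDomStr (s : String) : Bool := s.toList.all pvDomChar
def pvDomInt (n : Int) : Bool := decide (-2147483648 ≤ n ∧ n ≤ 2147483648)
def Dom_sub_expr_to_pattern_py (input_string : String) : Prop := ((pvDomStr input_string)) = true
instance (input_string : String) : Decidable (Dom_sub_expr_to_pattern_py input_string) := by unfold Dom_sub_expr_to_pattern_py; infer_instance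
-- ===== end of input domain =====

-- B replaces A's manual find/slice offset loop by a single regex-style leftmost scan
-- (re.sub on the alternation  \$\$#|\$#  with a function replacement); objective: idiomatic.

-- ===== PORT A =====
-- input_string.find("$", curr)  (Python str.find with a start offset)
def pvFind (s : List Char) (curr : Nat) : Int := PySem.Chars.findFrom s ['$'] (curr : Int)

-- The while-True loop of A, state = (curr_offset, result_string).  The loop advances
-- curr_offset on every iteration, so fuel = len(input_string) + 1 steps always suffice;
-- fuel only makes the recursion structural, the fuel-exhaustion branch is never reached.
def pvALoop (s : List Char) : Nat → Nat → List Char → List Char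
  | 0, curr, res => res ++ PySem.List.slice s (some (curr : Int)) none
  | fuel + 1, curr, res =>
    -- dollar_offset = input_string.find("$", curr); expr_offset = dollar_offset + 1
    if pvFind s curr < 0 ∨ pvFind s curr + 1 ≥ (s.length : Int) then
      -- break; result_string += input_string[curr_offset:]
      res ++ PySem.List.slice s (some (curr : Int)) none
    else if s[(pvFind s curr).toNat + 1]? = some '#' then
      -- input_string[expr_offset] == "#" (index in range here, so s[e]? = some _ is exact)
      pvALoop s fuel ((pvFind s curr).toNat + 2)
        (res ++ PySem.List.slice s (some (curr : Int)) (some (pvFind s curr)) ++ ['\\'])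
    else if (pvFind s curr).toNat + 3 ≤ s.length ∧
        PySem.List.slice s (some (((pvFind s curr).toNat + 1 : Nat) : Int))
          (some (((pvFind s curr).toNat + 3 : Nat) : Int)) = ['$', '#'] then
      -- after_escaped_offset <= len and input_string[curr:curr+2] == "$#"
      pvALoop s fuel ((pvFind s curr).toNat + 3)
        ((res ++ PySem.List.slice s (some (curr : Int)) (some (pvFind s curr + 1))) ++ ['#'])
    else
      pvALoop s fuel ((pvFind s curr).toNat + 1)
        (res ++ PySem.List.slice s (some (curr : Int)) (some (pvFind s curr + 1)))

def sub_expr_to_pattern_py (input_string : String) : String :=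
  String.ofList (pvALoop input_string.toList (input_string.toList.length + 1) 0 [])

-- ===== PORT B =====
-- Source B: re.sub(r'\$\$#|\$#', f, s).  The regex engine's leftmost non-overlapping scan:
-- at each position try the alternatives in order ('$$#' then '$#'); on a match emit the
-- replacement and resume after it, otherwise copy one character and move on.
def pvBScan (l : List Char) : List Char :=
  match l with
  | [] => []
  | c :: rest =>
    if c = '$' ∧ rest.take 2 = ['$', '#'] then '$' :: '#' :: pvBScan (rest.drop 2)
    else if c = '$' ∧ rest.take 1 = ['#'] then '\\' :: pvBScan (rest.drop 1)
    else c :: pvBScan rest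
termination_by l.length
decreasing_by all_goals simp

def sub_expr_to_pattern_py_alt (input_string : String) : String :=
  String.ofList (pvBScan input_string.toList)

-- ===== PRECONDITION & SPEC =====
def Spec_sub_expr_to_pattern_py (input_string : String) (out : String) : Prop := out = sub_expr_to_pattern_py_alt input_string
instance (input_string : String) (out : String) : Decidable (Spec_sub_expr_to_pattern_py input_string out) := by unfold Spec_sub_expr_to_pattern_py; infer_instance

-- ===== CLAIM (what is proved, stated in full; the proofs are below) =====
def Claim_equal_sub_expr_to_pattern_py : Prop := ∀ (input_string : String), Dom_sub_expr_to_pattern_py input_string → Spec_sub_expr_to_pattern_py input_string (sub_expr_to_pattern_py input_string)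

-- ===== LEMMAS AND PROOFS =====

lemma pv_singleton_infix (a : Char) (l : List Char) : [a] <:+: l ↔ a ∈ l := by
  constructor
  · intro h
    exact List.singleton_sublist.mp h.sublist
  · intro h
    obtain ⟨t1, t2, rfl⟩ := List.append_of_mem h
    exact ⟨t1, t2, by simp⟩

lemma pvBScan_nil : pvBScan [] = [] := by rw [pvBScan]

lemma pvBScan_cons_ne (c : Char) (l : List Char) (hc : c ≠ '$') :
    pvBScan (c :: l) = c :: pvBScan l := by
  rw [pvBScan]; simp [hc]

lemma pvBScan_no_dollar (t l : List Char) (h : ∀ c ∈ t, c ≠ '$') :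
    pvBScan (t ++ l) = t ++ pvBScan l := by
  induction t with
  | nil => simp
  | cons c t ih =>
    rw [List.cons_append, pvBScan_cons_ne c _ (h c (by simp)),
      ih (fun x hx => h x (by simp [hx])), List.cons_append]

lemma pvBScan_dollar (l : List Char) (h1 : l.take 2 ≠ ['$', '#']) (h2 : l.take 1 ≠ ['#']) :
    pvBScan ('$' :: l) = '$' :: pvBScan l := by
  rw [pvBScan]; simp [h1, h2]

lemma pvBScan_esc (l : List Char) : pvBScan ('$' :: '#' :: l) = '\\' :: pvBScan l := by
  rw [pvBScan]; simp

lemma pvBScan_ddh (l : List Char) : pvBScan ('$' :: '$' :: '#' :: l) = '$' :: '#' :: pvBScan l := by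
  rw [pvBScan]; simp

-- decomposition of the tail at the first '$' found at index j ≥ curr
lemma pvDecomp (s : List Char) (curr j : Nat) (hcj : curr ≤ j) (hjl : j < s.length)
    (hpre : ['$'] <+: s.drop j)
    (hmin : ∀ i, curr ≤ i → i < j → ¬ ['$'] <+: s.drop i) :
    s.drop curr = ((s.drop curr).take (j - curr)) ++ '$' :: s.drop (j + 1) ∧
      ∀ c ∈ (s.drop curr).take (j - curr), c ≠ '$' := by
  have h1 : s.drop j = '$' :: s.drop (j + 1) := by
    obtain ⟨r, hr⟩ := hpre
    have ht : r = s.drop (j + 1) := by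
      have := congrArg List.tail hr
      simpa [List.tail_drop] using this
    rw [← hr, ht]; rfl
  constructor
  · conv_lhs => rw [← List.take_append_drop (j - curr) (s.drop curr)]
    congr 1
    rw [List.drop_drop]
    have hjc : curr + (j - curr) = j := by omega
    rw [hjc, h1]
  · intro c hmem hceq
    subst hceq
    obtain ⟨i, hi, hval⟩ := List.mem_iff_getElem.mp hmem
    have hlen : i < j - curr := by
      have := hi
      simp [List.length_take] at this
      omega
    have hval' : s[curr + i]'(by simp at hi ⊢; omega) = '$' := by
      rw [List.getElem_take, List.getElem_drop] at hval
      exact hval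
    apply hmin (curr + i) (by omega) (by omega)
    rw [List.drop_eq_getElem_cons (by simp at hi ⊢; omega), hval']
    exact ⟨s.drop (curr + i + 1), rfl⟩

lemma pvALoop_eq (s : List Char) :
    ∀ (fuel curr : Nat) (res : List Char), curr ≤ s.length → s.length - curr < fuel →
      pvALoop s fuel curr res = res ++ pvBScan (s.drop curr) := by
  intro fuel
  induction fuel with
  | zero => intro curr res _ hn; omega
  | succ n ih =>
  intro curr res hc hn
  rw [pvALoop]
  simp only [pvFind]
  by_cases hd : PySem.Chars.findFrom s ['$'] (curr : Int) < 0 ∨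
      PySem.Chars.findFrom s ['$'] (curr : Int) + 1 ≥ (s.length : Int)
  · rw [if_pos hd, PySem.List.slice_from_natCast]
    congr 1
    by_cases hneg : PySem.Chars.findFrom s ['$'] (curr : Int) < 0
    · -- find returned -1: no '$' in s[curr:]
      have hm1 : PySem.Chars.findFrom s ['$'] (curr : Int) = -1 := by
        by_contra hne
        have := (PySem.Chars.findFrom_natCast_spec s ['$'] curr hc hne).1
        omega
      have hninf : ¬ ['$'] <:+: s.drop curr :=
        (PySem.Chars.findFrom_natCast_eq_neg_one_iff s ['$'] curr hc).mp hm1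
      have hnd : ∀ c ∈ s.drop curr, c ≠ '$' := by
        intro c hcm hceq; subst hceq
        exact hninf ((pv_singleton_infix '$' _).mpr hcm)
      have := pvBScan_no_dollar (s.drop curr) [] hnd
      simp [pvBScan_nil] at this
      rw [this]
    · -- '$' found but it is the last character
      have hne : PySem.Chars.findFrom s ['$'] (curr : Int) ≠ -1 := by omega
      obtain ⟨h1, h2, h3⟩ := PySem.Chars.findFrom_natCast_spec s ['$'] curr hc hne
      set j := (PySem.Chars.findFrom s ['$'] (curr : Int)).toNat with hj
      have hjl : j < s.length := by
        obtain ⟨r, hr⟩ := h2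
        by_contra hcon
        rw [List.drop_eq_nil_of_le (by omega)] at hr
        simp at hr
      obtain ⟨hsplit, hnod⟩ := pvDecomp s curr j (by omega) hjl h2 h3
      have hdd : s.drop (j + 1) = [] := List.drop_eq_nil_of_le (by omega)
      rw [hsplit, hdd, pvBScan_no_dollar _ _ hnod,
        pvBScan_dollar [] (by simp) (by simp), pvBScan_nil]
  · rw [if_neg hd]
    have hne : PySem.Chars.findFrom s ['$'] (curr : Int) ≠ -1 := by omega
    obtain ⟨h1, h2, h3⟩ := PySem.Chars.findFrom_natCast_spec s ['$'] curr hc hne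
    set j := (PySem.Chars.findFrom s ['$'] (curr : Int)).toNat with hj
    have hF : PySem.Chars.findFrom s ['$'] (curr : Int) = (j : Int) := by omega
    have hcj : curr ≤ j := by omega
    have hjlen : j + 1 < s.length := by omega
    obtain ⟨hsplit, hnod⟩ := pvDecomp s curr j hcj (by omega) h2 h3
    set t := (s.drop curr).take (j - curr) with htdef
    have htlen : t.length = j - curr := by
      simp [htdef, List.length_take]
      omega
    have hdropj1 : s.drop (j + 1) = s[j + 1]'hjlen :: s.drop (j + 2) :=
      List.drop_eq_getElem_cons hjlen
    -- slice s curr d  =  t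
    have hslice1 : PySem.List.slice s (some (curr : Int)) (some ((j : Nat) : Int)) = t := by
      rw [PySem.List.slice_natCast]
    -- slice s curr (d+1)  =  t ++ ['$']
    have hslice2 : PySem.List.slice s (some (curr : Int)) (some ((j : Int) + 1)) = t ++ ['$'] := by
      have h1' : ((j : Int) + 1) = ((j + 1 : Nat) : Int) := by push_cast; ring
      rw [h1', PySem.List.slice_natCast]
      rw [hsplit, show j + 1 - curr = t.length + 1 by omega, List.take_append]
      simp
    by_cases hh : s[j + 1]? = some '#'
    · rw [if_pos hh]
      have hch : s[j + 1]'hjlen = '#' := by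
        rw [List.getElem?_eq_getElem hjlen] at hh
        exact Option.some.inj hh
      have hslice1' : PySem.List.slice s (some (curr : Int))
          (some (PySem.Chars.findFrom s ['$'] (curr : Int))) = t := by
        rw [hF]; exact hslice1
      rw [hsplit, hdropj1, hch, pvBScan_no_dollar _ _ hnod, pvBScan_esc, hslice1']
      exact (ih (j + 2) (res ++ t ++ ['\\']) (by omega) (by omega)).trans (by simp)
    · rw [if_neg hh]
      have hslice2' : PySem.List.slice s (some (curr : Int))
          (some (PySem.Chars.findFrom s ['$'] (curr : Int) + 1)) = t ++ ['$'] := by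
        rw [hF]; exact hslice2
      by_cases hesc : (PySem.Chars.findFrom s ['$'] (curr : Int)).toNat + 3 ≤ s.length ∧
          PySem.List.slice s (some (((PySem.Chars.findFrom s ['$'] (curr : Int)).toNat + 1 : Nat) : Int))
            (some (((PySem.Chars.findFrom s ['$'] (curr : Int)).toNat + 3 : Nat) : Int)) = ['$', '#']
      · rw [if_pos hesc]
        have htk : (s.drop (j + 1)).take 2 = ['$', '#'] := by
          have h := hesc.2
          rw [show (PySem.Chars.findFrom s ['$'] (curr : Int)).toNat = j from rfl,
            PySem.List.slice_natCast] at h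
          simpa [show j + 3 - (j + 1) = 2 from by omega] using h
        have hdec : s.drop (j + 1) = '$' :: '#' :: s.drop (j + 3) := by
          conv_lhs => rw [← List.take_append_drop 2 (s.drop (j + 1))]
          rw [htk, List.drop_drop, show (j + 1) + 2 = j + 3 by omega]
          rfl
        rw [hsplit, hdec, pvBScan_no_dollar _ _ hnod, pvBScan_ddh, hslice2']
        exact (ih (j + 3) ((res ++ (t ++ ['$'])) ++ ['#']) (by omega) (by omega)).trans (by simp)
      · rw [if_neg hesc]
        have hc1 : s[j + 1]'hjlen ≠ '#' := by
          intro hcon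
          apply hh
          rw [List.getElem?_eq_getElem hjlen, hcon]
        have ht1 : (s.drop (j + 1)).take 1 ≠ ['#'] := by
          rw [hdropj1, List.take_succ_cons, List.take_zero]
          intro hcon
          injection hcon with h1 h2
          exact hc1 h1
        have ht2 : (s.drop (j + 1)).take 2 ≠ ['$', '#'] := by
          intro hcon
          apply hesc
          have hl2 : j + 3 ≤ s.length := by
            have hlen := congrArg List.length hcon
            simp [List.length_take, List.length_drop] at hlen
            omega
          refine ⟨by omega, ?_⟩
          rw [show (PySem.Chars.findFrom s ['$'] (curr : Int)).toNat = j from rfl,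
            PySem.List.slice_natCast]
          simpa [show j + 3 - (j + 1) = 2 from by omega] using hcon
        rw [hsplit, pvBScan_no_dollar _ _ hnod, pvBScan_dollar _ ht2 ht1, hslice2']
        exact (ih (j + 1) (res ++ (t ++ ['$'])) (by omega) (by omega)).trans (by simp)

-- ===== VERDICT (by name: the statement is the Claim_ definition above) =====
theorem sub_expr_to_pattern_py_spec : Claim_equal_sub_expr_to_pattern_py := by
  intro s _
  unfold Spec_sub_expr_to_pattern_py sub_expr_to_pattern_py sub_expr_to_pattern_py_alt
  congr 1
  simpa using pvALoop_eq s.toList (s.toList.length + 1) 0 [] (by simp) (by omega)
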